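-- pv_equiv track=rewrite | github.com/jerrychen1990/keras-nltk | eigen_nltk/utils.py | split_text_by_sep
-- ===== SOURCE A (Python) =====
-- def flat(seq):
--     return [e for item in seq for e in item]
--
-- def find_all_char(content, to_find, overlap=False, ignore_case=False):
--     rs_list = []
--     if ignore_case:
--         content = content.lower()
--         to_find = to_find.lower()
--     if not to_find:
--         return rs_list
--     text_len = len(to_find)
--
--     beg = 0
--     while True:
--         b = content.find(to_find, beg)
--         if b == -1:
--             return rs_list
--         e = b + text_len
--         rs_list.append((b, e))
--         beg = b + 1 if overlap else e
--     return rs_list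
--
-- def split_text_by_sep(text, sep_list):
--     idx_dict = {k: find_all_char(text, k) for k in sep_list}
--     idx_list = flat([(k, s) for s in span_list] for k, span_list in idx_dict.items())
--     idx_list = sorted(idx_list, key=lambda x: x[1][0])
--     beg = 0
--     rs_list = []
--     for k, (s, e) in idx_list:
--         rs_list.append(text[beg:s])
--         rs_list.append(k)
--         beg = e
--     rs_list.append(text[beg:])
--     return rs_list
-- ===== SOURCE B (Python) =====
-- def split_text_by_sep(text, sep_list):
--     # One left-to-right scan: at each position try each separator (first-listed wins ties);
--     # a per-separator cursor enforces non-overlapping matches of the same separator.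
--     seps = [s for s in dict.fromkeys(sep_list) if s]
--     nxt = {s: 0 for s in seps}
--     matches = []
--     for i in range(len(text)):
--         for s in seps:
--             if nxt[s] <= i and text[i:i + len(s)] == s:
--                 matches.append((s, i))
--                 nxt[s] = i + len(s)
--     pieces = []
--     last = 0
--     for s, i in matches:
--         pieces.append(text[last:i])
--         pieces.append(s)
--         last = i + len(s)
--     pieces.append(text[last:])
--     return pieces
-- ===== Notes on version B (the rewrite author's own statement) =====
-- stated objective: alternative
-- what changed: Replaced A's three-phase pipeline (per-separator str.find span lists in a dict, flatten, stable sort by start) by a single left-to-right scan that tests each separator at each position with a per-separator cursor, emitting matches already in (start, separator-priority) order with no dict-of-lists and no sort.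
import Mathlib
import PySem

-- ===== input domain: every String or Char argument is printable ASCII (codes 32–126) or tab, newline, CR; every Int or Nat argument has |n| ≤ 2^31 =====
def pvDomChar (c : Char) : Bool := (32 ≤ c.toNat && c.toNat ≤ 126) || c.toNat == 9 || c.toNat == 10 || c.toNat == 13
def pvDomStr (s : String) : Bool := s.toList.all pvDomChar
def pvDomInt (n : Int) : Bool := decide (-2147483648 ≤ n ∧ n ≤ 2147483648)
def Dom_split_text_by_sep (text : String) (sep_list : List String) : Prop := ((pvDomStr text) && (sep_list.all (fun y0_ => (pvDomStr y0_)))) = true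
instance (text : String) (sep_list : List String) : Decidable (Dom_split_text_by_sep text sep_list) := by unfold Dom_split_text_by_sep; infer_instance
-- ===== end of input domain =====

-- B replaces A's dict-of-span-lists + flatten + stable sort by a single left-to-right scan
-- with per-separator cursors; same return value, alternative algorithm (no speed claim).

-- ===== PORT A =====

-- [e for item in seq for e in item]
def pvFlat {α : Type} (seq : List (List α)) : List α :=
  seq.flatMap (fun item => item)

-- the 'while True' loop of find_all_char; fuel only makes the recursion total,
-- the supplied fuel (len(content) + 2) is never exhausted
def pvFindLoop (content to_find : String) (text_len : Int) (overlap : Bool)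
    (rs_list : List (Int × Int)) (beg : Int) : Nat → List (Int × Int)
  | 0 => rs_list
  | fuel + 1 =>
    let b := PySem.Str.findFrom content to_find beg
    if b = -1 then rs_list
    else
      let e := b + text_len
      pvFindLoop content to_find text_len overlap (rs_list ++ [(b, e)])
        (if overlap then b + 1 else e) fuel

def find_all_char (content to_find : String) (overlap ignore_case : Bool) : List (Int × Int) :=
  let content := if ignore_case then PySem.Str.lower content else content
  let to_find := if ignore_case then PySem.Str.lower to_find else to_find
  if to_find == "" then []
  else
    let text_len := PySem.Str.len to_find
    pvFindLoop content to_find text_len overlap [] 0 (content.toList.length + 2)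

def split_text_by_sep (text : String) (sep_list : List String) : List String :=
  let idx_dict : PySem.Dict String (List (Int × Int)) :=
    sep_list.foldl (fun d k => d.insert k (find_all_char text k false false)) PySem.Dict.empty
  let idx_list :=
    pvFlat (idx_dict.items.map (fun kv => kv.2.map (fun s => (kv.1, s))))
  let idx_list := PySem.List.sorted idx_list (fun x => x.2.1) false
  let st :=
    idx_list.foldl
      (fun st x =>
        (st.1 ++ [PySem.Str.slice text (some st.2) (some x.2.1), x.1], x.2.2))
      (([] : List String), (0 : Int))
  st.1 ++ [PySem.Str.slice text (some st.2) none]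

-- ===== PORT B =====

-- one scan position: try every separator at position i (cursor dict nxt)
def pvScanStep (text : String) (seps : List String)
    (st : List (String × Int) × PySem.Dict String Int) (i : Int) :
    List (String × Int) × PySem.Dict String Int :=
  seps.foldl
    (fun st s =>
      if st.2.getD s 0 ≤ i ∧ PySem.Str.slice text (some i) (some (i + PySem.Str.len s)) == s then
        (st.1 ++ [(s, i)], st.2.insert s (i + PySem.Str.len s))
      else st)
    st

def split_text_by_sep_alt (text : String) (sep_list : List String) : List String :=
  let seps := (PySem.List.dedup sep_list).filter (fun s => !(s == ""))
  let nxt : PySem.Dict String Int := seps.foldl (fun d s => d.insert s 0) PySem.Dict.empty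
  let scan :=
    (PySem.List.pyRange 0 (PySem.Str.len text) 1).foldl (pvScanStep text seps) ([], nxt)
  let st :=
    scan.1.foldl
      (fun st m =>
        (st.1 ++ [PySem.Str.slice text (some st.2) (some m.2), m.1], m.2 + PySem.Str.len m.1))
      (([] : List String), (0 : Int))
  st.1 ++ [PySem.Str.slice text (some st.2) none]

-- ===== PRECONDITION & SPEC =====
def Spec_split_text_by_sep (text : String) (sep_list : List String) (out : List String) : Prop := out = split_text_by_sep_alt text sep_list
instance (text : String) (sep_list : List String) (out : List String) : Decidable (Spec_split_text_by_sep text sep_list out) := by unfold Spec_split_text_by_sep; infer_instance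

-- ===== CLAIM (what is proved, stated in full; the proofs are below) =====
def Claim_equal_split_text_by_sep : Prop := ∀ (text : String) (sep_list : List String), Dom_split_text_by_sep text sep_list → Spec_split_text_by_sep text sep_list (split_text_by_sep text sep_list)

-- ===== LEMMAS AND PROOFS =====

-- helper: a prefix-match further right is an infix of the earlier drop
theorem pv_infix_drop {t k : List Char} {p i : Nat} (hpi : p ≤ i)
    (h : k <+: t.drop i) : k <:+: t.drop p := by
  have : t.drop i = (t.drop p).drop (i - p) := by
    rw [List.drop_drop]; congr 1; omega
  rw [this] at h
  exact h.isInfix.trans (List.drop_suffix _ _).isInfix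

theorem pvFindLoop_spec (content to_find : String) (hk : to_find.toList ≠ [])
    (fuel : Nat) : ∀ (p : Nat) (rs : List (Int × Int)),
    p ≤ content.toList.length → content.toList.length + 1 - p ≤ fuel →
    ∃ rest,
      pvFindLoop content to_find (to_find.toList.length : Int) false rs (p : Int) fuel
        = rs ++ rest ∧
      (∀ x ∈ rest, ∃ s : Nat, x = ((s : Int), (s : Int) + to_find.toList.length) ∧
          p ≤ s ∧ to_find.toList <+: content.toList.drop s ∧
          s + to_find.toList.length ≤ content.toList.length) ∧
      rest.Pairwise (fun a b => a.1 + (to_find.toList.length : Int) ≤ b.1) ∧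
      (∀ i : Nat, p ≤ i → to_find.toList <+: content.toList.drop i →
        ∃ x ∈ rest, x.1 ≤ (i : Int) ∧ (i : Int) < x.1 + to_find.toList.length) := by
  induction fuel with
  | zero => intro p rs hp hf; omega
  | succ fuel ih =>
    intro p rs hp hf
    set t := content.toList with ht
    set kc := to_find.toList with hkc
    have hkl : 1 ≤ kc.length := List.length_pos_of_ne_nil hk
    by_cases hb : PySem.Str.findFrom content to_find (p : Int) = -1
    · refine ⟨[], ?_, by simp, by simp, ?_⟩
      · have hb' : PySem.Chars.findFrom content.toList to_find.toList (p : Int) = -1 := by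
          rw [← PySem.Str.findFrom_eq]; exact hb
        simp [pvFindLoop, hb']
      · intro i hpi hi
        have hnone : ¬ kc <:+: t.drop p := by
          have := (PySem.Chars.findFrom_natCast_eq_neg_one_iff t kc p hp).mp (by
            simpa [PySem.Str.findFrom_eq] using hb)
          exact this
        exact absurd (pv_infix_drop hpi hi) hnone
    · obtain ⟨hge, hpre, hmin⟩ := PySem.Chars.findFrom_natCast_spec t kc p hp (by
        simpa [PySem.Str.findFrom_eq] using hb)
      set b := PySem.Str.findFrom content to_find (p : Int) with hbdef
      have hbc : PySem.Chars.findFrom t kc (p : Int) = b := by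
        rw [hbdef, PySem.Str.findFrom_eq]
      rw [hbc] at hge hpre hmin
      have hb0 : 0 ≤ b := le_trans (by positivity) hge
      set s := b.toNat with hs
      have hbs : b = (s : Int) := by omega
      have hps : p ≤ s := by omega
      have hfit : s + kc.length ≤ t.length := by
        have := hpre.length_le
        simp at this
        omega
      have hstep : pvFindLoop content to_find (kc.length : Int) false rs (p : Int) (fuel + 1)
          = pvFindLoop content to_find (kc.length : Int) false (rs ++ [(b, b + kc.length)])
              ((s : Int) + kc.length) fuel := by
        simp only [pvFindLoop, hbc]
        rw [← hbdef]
        simp [hb, hbs]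
      have hcast : ((s : Int) + kc.length) = ((s + kc.length : Nat) : Int) := by push_cast; ring
      obtain ⟨rest, heq, hshape, hpw, hcomp⟩ :=
        ih (s + kc.length) (rs ++ [(b, b + kc.length)]) (by omega) (by omega)
      rw [hcast] at hstep
      refine ⟨(b, b + kc.length) :: rest, ?_, ?_, ?_, ?_⟩
      · rw [hstep, heq]; simp
      · intro x hx
        rcases List.mem_cons.mp hx with hx | hx
        · subst hx; exact ⟨s, by rw [hbs], hps, hpre, hfit⟩
        · obtain ⟨s', hx', hs', hm', hf'⟩ := hshape x hx
          exact ⟨s', hx', by omega, hm', hf'⟩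
      · refine List.Pairwise.cons ?_ hpw
        intro x hx
        obtain ⟨s', hx', hs', _, _⟩ := hshape x hx
        simp [hx', hbs]; push_cast; omega
      · intro i hpi hi
        by_cases his : i < s
        · exact absurd hi (hmin i hpi (by omega))
        · by_cases hcov : i < s + kc.length
          · exact ⟨(b, b + kc.length), by simp, by simp [hbs]; omega, by simp [hbs]; push_cast; omega⟩
          · obtain ⟨x, hx, h1, h2⟩ := hcomp i (by omega) hi
            exact ⟨x, List.mem_cons_of_mem _ hx, h1, h2⟩

-- ===================== stage 2: characterization of find_all_char =====================

theorem pv_len_eq (s : String) : PySem.Str.len s = (s.toList.length : Int) := by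
  simp [PySem.Str.len_eq]

theorem pv_find_all_nil (content k : String) (hk : k.toList = []) :
    find_all_char content k false false = [] := by
  have : k = "" := String.toList_eq_nil_iff.mp hk
  subst this
  simp [find_all_char]

theorem pv_find_all_eq_loop (content k : String) (hk : k.toList ≠ []) :
    find_all_char content k false false
      = pvFindLoop content k ((k.toList.length : Nat) : Int) false [] 0
          (content.toList.length + 2) := by
  have hne : ¬ k = "" := fun e => by subst e; simp at hk
  simp [find_all_char, hne, pv_len_eq]

theorem pvG_spec (content k : String) (hk : k.toList ≠ []) :
    (∀ x ∈ find_all_char content k false false, ∃ s : Nat,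
        x = ((s : Int), (s : Int) + k.toList.length) ∧
        k.toList <+: content.toList.drop s ∧
        s + k.toList.length ≤ content.toList.length) ∧
    (find_all_char content k false false).Pairwise
      (fun a b => a.1 + (k.toList.length : Int) ≤ b.1) ∧
    (∀ i : Nat, k.toList <+: content.toList.drop i →
      ∃ x ∈ find_all_char content k false false,
        x.1 ≤ (i : Int) ∧ (i : Int) < x.1 + k.toList.length) := by
  obtain ⟨rest, heq, hshape, hpw, hcomp⟩ :=
    pvFindLoop_spec content k hk (content.toList.length + 2) 0 [] (by omega) (by omega)
  rw [pv_find_all_eq_loop content k hk]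
  have h0 : ((0 : Nat) : Int) = (0 : Int) := rfl
  rw [← h0, heq]
  simp only [List.nil_append]
  exact ⟨fun x hx => by
    obtain ⟨s, h1, _, h3, h4⟩ := hshape x hx
    exact ⟨s, h1, h3, h4⟩, hpw, fun i hi => hcomp i (by omega) hi⟩

-- slice-compare is prefix matching
theorem pv_slice_beq_iff (text k : String) (i : Int) (h0 : 0 ≤ i) :
    ((PySem.Str.slice text (some i) (some (i + PySem.Str.len k)) == k) = true)
      ↔ k.toList <+: text.toList.drop i.toNat := by
  have hkl : (0 : Int) ≤ (k.toList.length : Int) := by positivity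
  have htl : (PySem.Str.slice text (some i) (some (i + PySem.Str.len k))).toList
      = (text.toList.drop i.toNat).take k.toList.length := by
    rw [PySem.Str.toList_slice, PySem.Chars.slice_eq_listSlice, pv_len_eq,
      PySem.List.slice_toNat _ h0 (by omega)]
    congr 1
    omega
  constructor
  · intro hbeq
    have hs : (PySem.Str.slice text (some i) (some (i + PySem.Str.len k))) = k := by
      simpa using hbeq
    rw [List.prefix_iff_eq_take]
    have h3 := congrArg String.toList hs
    rw [htl] at h3
    exact h3.symm
  · intro hpre
    have h1 : k.toList = (text.toList.drop i.toNat).take k.toList.length := by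
      simpa using List.prefix_iff_eq_take.mp hpre
    have h2 : (PySem.Str.slice text (some i) (some (i + PySem.Str.len k))) = k :=
      String.ext (by rw [htl, ← h1])
    rw [beq_iff_eq]
    exact h2

-- ===================== stage 3: list utilities =====================

theorem pv_foldl_const_last (c : Int) : ∀ (l : List Int) (z : Int),
    l.foldl (fun _ s => s + c) z = (match l.getLast? with | none => z | some s => s + c) := by
  intro l
  induction l with
  | nil => intro z; simp
  | cons a l ih =>
    intro z
    rw [List.foldl_cons, ih]
    cases l with
    | nil => simp
    | cons b l' =>
      cases h : (b :: l').getLast? with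
      | none => simp at h
      | some s => simp [h]

theorem pv_pairwise_mem_add (c : Int) (hc : 1 ≤ c) : ∀ (l : List Int),
    l.Pairwise (fun a b => a + c ≤ b) → ∀ s ∈ l, ∀ t ∈ l, s < t → s + c ≤ t := by
  intro l
  induction l with
  | nil => simp
  | cons a l ih =>
    intro hpw s hs t ht hst
    rw [List.pairwise_cons] at hpw
    rcases List.mem_cons.mp hs with hs1 | hs1 <;> rcases List.mem_cons.mp ht with ht1 | ht1
    · omega
    · subst hs1; exact hpw.1 t ht1
    · subst ht1; have := hpw.1 s hs1; omega
    · exact ih hpw.2 s hs1 t ht1 hst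

theorem pv_mem_le_getLast : ∀ (l : List Int), l.Pairwise (fun a b => a < b) →
    ∀ x ∈ l, ∀ h : l ≠ [], x ≤ l.getLast h := by
  intro l
  induction l with
  | nil => simp
  | cons a l ih =>
    intro hpw x hx h
    rw [List.pairwise_cons] at hpw
    cases l with
    | nil => simp at hx; simp [hx]
    | cons b l' =>
      rw [List.getLast_cons (by simp)]
      rcases List.mem_cons.mp hx with rfl | hx
      · have hb := hpw.1 b (by simp)
        have := ih hpw.2 b (by simp) (by simp)
        omega
      · exact ih hpw.2 x hx (by simp)

theorem pv_filter_lt_succ (i : Int) : ∀ (l : List Int), l.Pairwise (fun a b => a < b) →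
    l.filter (fun s => decide (s < i + 1))
      = l.filter (fun s => decide (s < i)) ++ l.filter (fun s => s == i) := by
  intro l
  induction l with
  | nil => simp
  | cons a l ih =>
    intro hpw
    rw [List.pairwise_cons] at hpw
    by_cases ha : a < i
    · rw [List.filter_cons_of_pos (by simp; omega), List.filter_cons_of_pos (by simp [ha]),
        List.filter_cons_of_neg (by simp; omega)]
      rw [ih hpw.2]
      simp
    · by_cases hai : a = i
      · subst hai
        have hrest1 : l.filter (fun s => decide (s < a)) = [] := by
          rw [List.filter_eq_nil_iff]
          intro z hz
          have := hpw.1 z hz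
          simp
          omega
        have hrest2 : l.filter (fun s => s == a) = [] := by
          rw [List.filter_eq_nil_iff]
          intro z hz
          have := hpw.1 z hz
          simp
          omega
        have hrest3 : l.filter (fun s => decide (s < a + 1)) = [] := by
          rw [List.filter_eq_nil_iff]
          intro z hz
          have := hpw.1 z hz
          simp
          omega
        rw [List.filter_cons_of_pos (by simp), List.filter_cons_of_neg (by simp),
          List.filter_cons_of_pos (by simp), hrest1, hrest2, hrest3]
        simp
      · rw [List.filter_cons_of_neg (by simp; omega), List.filter_cons_of_neg (by simp; omega),
          List.filter_cons_of_neg (by simp [hai])]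
        exact ih hpw.2

theorem pv_filter_eq_single (i : Int) (l : List Int) (hnd : l.Nodup) :
    l.filter (fun s => s == i) = if i ∈ l then [i] else [] := by
  rw [List.filter_beq]
  by_cases h : i ∈ l
  · rw [List.count_eq_one_of_mem hnd h]
    simp [h]
  · rw [List.count_eq_zero_of_not_mem h]
    simp [h]

theorem pv_flatMap_if_nodup {β : Type} (g : Int → List β) (v : Int) :
    ∀ (l : List Int), l.Nodup →
    (l.flatMap fun i => if i = v then g i else []) = if v ∈ l then g v else [] := by
  intro l
  induction l with
  | nil => simp
  | cons a l ih =>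
    intro hnd
    rw [List.nodup_cons] at hnd
    rw [List.flatMap_cons, ih hnd.2]
    by_cases hav : a = v
    · subst hav
      simp [hnd.1]
    · simp [hav, eq_comm (a := v) (b := a), hav]

theorem pv_getD_foldl_insert_fn {ν : Type} (f : String → ν) :
    ∀ (l : List String) (d : PySem.Dict String ν) (x : String) (dflt : ν),
    (l.foldl (fun d k => d.insert k (f k)) d).getD x dflt
      = if x ∈ l then f x else d.getD x dflt := by
  intro l
  induction l with
  | nil => intro d x dflt; simp
  | cons a l ih =>
    intro d x dflt
    rw [List.foldl_cons, ih]
    by_cases hx : x ∈ l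
    · simp [hx]
    · rw [PySem.Dict.getD_insert]
      by_cases hxa : x = a <;> simp [hx, hxa]

theorem pv_flatMap_filter_skip {β : Type} (p : String → Bool) (g : String → List β) :
    ∀ (l : List String), (∀ x ∈ l, p x = false → g x = []) →
    (l.filter p).flatMap g = l.flatMap g := by
  intro l
  induction l with
  | nil => simp
  | cons a l ih =>
    intro h
    rw [List.filter_cons]
    by_cases ha : p a = true
    · simp only [ha, if_true]
      rw [List.flatMap_cons, List.flatMap_cons, ih (fun x hx => h x (by simp [hx]))]
    · have ha' : p a = false := by simpa using ha
      simp only [ha', Bool.false_eq_true, if_false]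
      rw [List.flatMap_cons, h a (by simp) ha', ih (fun x hx => h x (by simp [hx]))]
      simp

-- ===================== stage 5: match starts and cursor function =====================

def pvStarts (text k : String) : List Int :=
  (find_all_char text k false false).map Prod.fst

def pvGend (text k : String) (i : Int) : Int :=
  ((pvStarts text k).filter (fun s => decide (s < i))).foldl
    (fun _ s => s + (k.toList.length : Int)) 0

theorem pvStarts_props (text k : String) (hk : k.toList ≠ []) :
    (pvStarts text k).Pairwise (fun a b => a + (k.toList.length : Int) ≤ b) ∧
    (∀ s ∈ pvStarts text k, 0 ≤ s ∧ s + k.toList.length ≤ text.toList.length ∧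
      k.toList <+: text.toList.drop s.toNat) ∧
    (∀ i : Nat, k.toList <+: text.toList.drop i →
      ∃ s ∈ pvStarts text k, s ≤ (i : Int) ∧ (i : Int) < s + k.toList.length) := by
  obtain ⟨hshape, hpw, hcomp⟩ := pvG_spec text k hk
  refine ⟨?_, ?_, ?_⟩
  · rw [pvStarts, List.pairwise_map]
    exact hpw
  · intro s hs
    rw [pvStarts, List.mem_map] at hs
    obtain ⟨x, hx, rfl⟩ := hs
    obtain ⟨s', hxeq, hpre, hfit⟩ := hshape x hx
    subst hxeq
    refine ⟨by positivity, by push_cast; omega, by simpa using hpre⟩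
  · intro i hpre
    obtain ⟨x, hx, h1, h2⟩ := hcomp i hpre
    exact ⟨x.1, by rw [pvStarts]; exact List.mem_map_of_mem hx, h1, h2⟩

theorem pvStarts_lt (text k : String) (hk : k.toList ≠ []) :
    (pvStarts text k).Pairwise (fun a b => a < b) := by
  have hkl : 1 ≤ k.toList.length := List.length_pos_of_ne_nil hk
  exact ((pvStarts_props text k hk).1).imp (by intro a b h; omega)

theorem pvStarts_nodup (text k : String) (hk : k.toList ≠ []) :
    (pvStarts text k).Nodup :=
  (pvStarts_lt text k hk).imp (fun h => ne_of_lt h)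

theorem pv_gend_le_of_mem (text k : String) (hk : k.toList ≠ []) (i : Int) (h0 : 0 ≤ i)
    (hmem : i ∈ pvStarts text k) : pvGend text k i ≤ i := by
  have hkl : 1 ≤ k.toList.length := List.length_pos_of_ne_nil hk
  rw [pvGend, pv_foldl_const_last]
  cases hlast : ((pvStarts text k).filter (fun s => decide (s < i))).getLast? with
  | none => simpa using h0
  | some s =>
    simp only []
    have hmemf : s ∈ (pvStarts text k).filter (fun s => decide (s < i)) :=
      List.mem_of_getLast? hlast
    rw [List.mem_filter] at hmemf
    have hsi : s < i := by simpa using hmemf.2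
    exact pv_pairwise_mem_add _ (by omega) _ ((pvStarts_props text k hk).1)
      s hmemf.1 i hmem hsi

theorem pv_mem_of_gend_le (text k : String) (hk : k.toList ≠ []) (i : Int) (h0 : 0 ≤ i)
    (hle : pvGend text k i ≤ i) (hpre : k.toList <+: text.toList.drop i.toNat) :
    i ∈ pvStarts text k := by
  have hkl : 1 ≤ k.toList.length := List.length_pos_of_ne_nil hk
  obtain ⟨hpw, hmem, hcomp⟩ := pvStarts_props text k hk
  obtain ⟨s, hs, hs1, hs2⟩ := hcomp i.toNat hpre
  rw [Int.toNat_of_nonneg h0] at hs1 hs2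
  by_cases hsi : s = i
  · rwa [hsi] at hs
  · exfalso
    have hsilt : s < i := lt_of_le_of_ne hs1 hsi
    have hsf : s ∈ (pvStarts text k).filter (fun s => decide (s < i)) := by
      rw [List.mem_filter]
      exact ⟨hs, by simpa using hsilt⟩
    have hne : (pvStarts text k).filter (fun s => decide (s < i)) ≠ [] :=
      List.ne_nil_of_mem hsf
    have hlast := pv_mem_le_getLast _ ((pvStarts_lt text k hk).filter _) s hsf hne
    rw [pvGend, pv_foldl_const_last, List.getLast?_eq_getLast hne] at hle
    simp only [] at hle
    omega

theorem pv_gend_succ (text k : String) (hk : k.toList ≠ []) (i : Int) :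
    pvGend text k (i + 1)
      = if i ∈ pvStarts text k then i + k.toList.length else pvGend text k i := by
  rw [pvGend, pv_filter_lt_succ i _ (pvStarts_lt text k hk),
    pv_filter_eq_single i _ (pvStarts_nodup text k hk)]
  by_cases hmem : i ∈ pvStarts text k
  · rw [if_pos hmem, if_pos hmem, List.foldl_append]
    simp
  · rw [if_neg hmem, if_neg hmem, List.append_nil, pvGend]

theorem pv_inner (text : String) (i : Int) (h0 : 0 ≤ i) :
    ∀ (ks : List String), ks.Nodup → (∀ k ∈ ks, k.toList ≠ []) →
    ∀ (acc : List (String × Int)) (nxt : PySem.Dict String Int),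
    (∀ k ∈ ks, nxt.getD k 0 = pvGend text k i) →
    ∃ nxt',
      ks.foldl (fun st s =>
        if st.2.getD s 0 ≤ i ∧ PySem.Str.slice text (some i) (some (i + PySem.Str.len s)) == s then
          (st.1 ++ [(s, i)], st.2.insert s (i + PySem.Str.len s))
        else st) (acc, nxt)
      = (acc ++ ks.flatMap (fun k => if i ∈ pvStarts text k then [(k, i)] else []), nxt') ∧
      (∀ k : String, nxt'.getD k 0 = if k ∈ ks then pvGend text k (i + 1) else nxt.getD k 0) := by
  intro ks
  induction ks with
  | nil =>
    intro _ _ acc nxt _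
    exact ⟨nxt, by simp, by simp⟩
  | cons k ks ih =>
    intro hnd hne acc nxt hinv
    rw [List.nodup_cons] at hnd
    have hkn : k.toList ≠ [] := hne k (by simp)
    have hget : nxt.getD k 0 = pvGend text k i := hinv k (by simp)
    rw [List.foldl_cons]
    by_cases hmem : i ∈ pvStarts text k
    · have hcond : nxt.getD k 0 ≤ i ∧
          (PySem.Str.slice text (some i) (some (i + PySem.Str.len k)) == k) = true := by
        constructor
        · rw [hget]; exact pv_gend_le_of_mem text k hkn i h0 hmem
        · rw [pv_slice_beq_iff text k i h0]
          exact ((pvStarts_props text k hkn).2.1 i hmem).2.2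
      rw [if_pos hcond]
      obtain ⟨nxt', heq, hnxt⟩ := ih hnd.2 (fun x hx => hne x (by simp [hx]))
        (acc ++ [(k, i)]) (nxt.insert k (i + PySem.Str.len k))
        (by
          intro k' hk'
          rw [PySem.Dict.getD_insert, if_neg (by rintro rfl; exact hnd.1 hk')]
          exact hinv k' (by simp [hk']))
      refine ⟨nxt', by rw [heq]; simp [hmem], ?_⟩
      intro k''
      rw [hnxt k'']
      by_cases hks : k'' ∈ ks
      · simp [hks]
      · rw [if_neg hks, PySem.Dict.getD_insert]
        by_cases hkk : k'' = k
        · subst hkk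
          rw [if_pos rfl, if_pos (by simp), pv_gend_succ text k'' hkn i, if_pos hmem,
            pv_len_eq]
        · rw [if_neg hkk, if_neg (by simp [hkk, hks])]
    · have hcond : ¬ (nxt.getD k 0 ≤ i ∧
          (PySem.Str.slice text (some i) (some (i + PySem.Str.len k)) == k) = true) := by
        rintro ⟨h1, h2⟩
        rw [pv_slice_beq_iff text k i h0] at h2
        exact hmem (pv_mem_of_gend_le text k hkn i h0 (hget ▸ h1) h2)
      rw [if_neg hcond]
      obtain ⟨nxt', heq, hnxt⟩ := ih hnd.2 (fun x hx => hne x (by simp [hx])) acc nxt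
        (fun k' hk' => hinv k' (by simp [hk']))
      refine ⟨nxt', by rw [heq]; simp [hmem], ?_⟩
      intro k''
      rw [hnxt k'']
      by_cases hks : k'' ∈ ks
      · simp [hks]
      · rw [if_neg hks]
        by_cases hkk : k'' = k
        · subst hkk
          rw [if_pos (by simp), pv_gend_succ text k'' hkn i, if_neg hmem, hinv k'' (by simp)]
        · rw [if_neg (by simp [hkk, hks])]

theorem pv_outer (text : String) (seps : List String) (hnd : seps.Nodup)
    (hne : ∀ k ∈ seps, k.toList ≠ []) :
    ∀ (m : Nat) (a : Nat) (acc : List (String × Int)) (nxt : PySem.Dict String Int),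
    a + m = text.toList.length →
    (∀ k ∈ seps, nxt.getD k 0 = pvGend text k (a : Int)) →
    ((PySem.List.pyRange (a : Int) ((text.toList.length : Nat) : Int) 1).foldl
        (pvScanStep text seps) (acc, nxt)).1
      = acc ++ (PySem.List.pyRange (a : Int) ((text.toList.length : Nat) : Int) 1).flatMap
          (fun i => seps.flatMap (fun k => if i ∈ pvStarts text k then [(k, i)] else [])) := by
  intro m
  induction m with
  | zero =>
    intro a acc nxt hlen hinv
    rw [PySem.List.pyRange_one_eq_nil (by omega)]
    simp
  | succ m ih =>
    intro a acc nxt hlen hinv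
    rw [PySem.List.pyRange_one_cons (by omega)]
    rw [List.foldl_cons, List.flatMap_cons]
    obtain ⟨nxt', heq, hnxt⟩ := pv_inner text (a : Int) (by positivity) seps hnd hne acc nxt hinv
    rw [pvScanStep, heq]
    have hcast : ((a : Int) + 1) = (((a + 1 : Nat) : Nat) : Int) := by push_cast; ring
    rw [hcast]
    rw [ih (a + 1) _ nxt' (by omega) (by intro k hk; rw [hnxt k, if_pos hk]; norm_cast)]
    simp

-- ===================== stage 6: A-side list =====================

def pvSeps (sep_list : List String) : List String :=
  (PySem.List.dedup sep_list).filter (fun s => !(s == ""))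

theorem pvSeps_nodup (sep_list : List String) : (pvSeps sep_list).Nodup :=
  (PySem.Set.nodup_ofList sep_list).filter _

theorem pvSeps_ne (sep_list : List String) : ∀ k ∈ pvSeps sep_list, k.toList ≠ [] := by
  intro k hk
  rw [pvSeps, List.mem_filter] at hk
  have : ¬ k = "" := by simpa using hk.2
  simpa [String.toList_eq_nil_iff]

theorem pv_idx_list_eq (text : String) (sep_list : List String) :
    pvFlat (((sep_list.foldl (fun d k => d.insert k (find_all_char text k false false))
        PySem.Dict.empty)).items.map (fun kv => kv.2.map (fun s => (kv.1, s))))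
      = (pvSeps sep_list).flatMap
          (fun k => (find_all_char text k false false).map (fun s => (k, s))) := by
  set f : String → List (Int × Int) := fun k => find_all_char text k false false with hf
  have hkeys : (sep_list.foldl (fun d k => d.insert k (f k)) PySem.Dict.empty).keys
      = PySem.Set.ofList sep_list := by
    rw [PySem.Dict.keys_foldl_insert sep_list (fun _ k => f k) PySem.Dict.empty]
    simp [PySem.Set.update_nil_left]
  have hnd : (sep_list.foldl (fun d k => d.insert k (f k)) PySem.Dict.empty).keys.Nodup :=
    PySem.Dict.nodup_keys_foldl_insert sep_list (fun _ k => f k) PySem.Dict.empty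
      PySem.Dict.nodup_keys_empty
  rw [PySem.Dict.items_eq_map_keys _ hnd [], hkeys]
  rw [List.map_map]
  have hmap : (PySem.Set.ofList sep_list).map
        ((fun kv : String × List (Int × Int) => kv.2.map (fun s => (kv.1, s)))
          ∘ fun k => (k, (sep_list.foldl (fun d k => d.insert k (f k)) PySem.Dict.empty).getD k []))
      = (PySem.Set.ofList sep_list).map (fun k => (f k).map (fun s => (k, s))) := by
    refine List.map_congr_left ?_
    intro k hk
    have hkmem : k ∈ sep_list := (PySem.Set.mem_ofList sep_list k).mp hk
    simp only [Function.comp]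
    rw [pv_getD_foldl_insert_fn f sep_list PySem.Dict.empty k [], if_pos hkmem]
  rw [hmap]
  have hflat : ∀ (L : List String),
      pvFlat (L.map (fun k => (f k).map (fun s => (k, s))))
        = L.flatMap (fun k => (f k).map (fun s => (k, s))) := by
    intro L
    rw [pvFlat, List.flatMap_def, List.flatMap_def, List.map_map]
    rfl
  rw [hflat]
  rw [show PySem.Set.ofList sep_list = PySem.List.dedup sep_list from rfl]
  rw [← pv_flatMap_filter_skip (fun s => !(s == "")) _ (PySem.List.dedup sep_list) ?_]
  · rfl
  · intro x hx hpx
    have : x = "" := by simpa using hpx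
    subst this
    rw [hf]
    simp [pv_find_all_nil text "" rfl]

-- at most one span per start inside one separator's list
theorem pv_pair_filter (c : Int) (hc : 1 ≤ c) : ∀ (l : List (Int × Int)),
    l.Pairwise (fun a b => a.1 + c ≤ b.1) → (∀ x ∈ l, x.2 = x.1 + c) → ∀ v : Int,
    l.filter (fun x => x.1 == v) = if v ∈ l.map Prod.fst then [(v, v + c)] else [] := by
  intro l
  induction l with
  | nil => simp
  | cons x l ih =>
    intro hpw hsnd v
    rw [List.pairwise_cons] at hpw
    by_cases hxv : x.1 = v
    · rw [List.filter_cons_of_pos (by simp [hxv])]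
      have hrest : l.filter (fun x => x.1 == v) = [] := by
        rw [List.filter_eq_nil_iff]
        intro z hz
        have := hpw.1 z hz
        simp
        omega
      rw [hrest]
      have hx : x = (v, v + c) := by
        have h2 := hsnd x (by simp)
        have : x = (x.1, x.2) := rfl
        rw [this, hxv, h2, hxv]
      rw [if_pos (by simp [← hxv])]
      simp [hx]
    · rw [List.filter_cons_of_neg (by simp [hxv])]
      rw [ih hpw.2 (fun z hz => hsnd z (by simp [hz])) v]
      by_cases hm : v ∈ l.map Prod.fst
      · rw [if_pos hm, if_pos (by simp [hm])]
      · rw [if_neg hm, if_neg (by simp [hxv, hm, eq_comm (a := v)])]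


theorem pv_insertBy_nil {α : Type} (before : α → α → Bool) (x : α) :
    PySem.List.insertBy before x [] = [x] := rfl

theorem pv_insertBy_cons_pos {α : Type} (before : α → α → Bool) (x y : α) (ys : List α)
    (h : before x y = true) :
    PySem.List.insertBy before x (y :: ys) = x :: y :: ys := by
  simp [PySem.List.insertBy, h]

theorem pv_insertBy_cons_neg {α : Type} (before : α → α → Bool) (x y : α) (ys : List α)
    (h : before x y = false) :
    PySem.List.insertBy before x (y :: ys) = y :: PySem.List.insertBy before x ys := by
  simp [PySem.List.insertBy, h]

theorem pv_insertBy_pairwise {α : Type} (key : α → Int) (x : α) (acc : List α)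
    (h : acc.Pairwise (fun a b => key a ≤ key b)) :
    (PySem.List.insertBy (fun a b => decide (key a < key b)) x acc).Pairwise
      (fun a b => key a ≤ key b) := by
  induction acc with
  | nil => simp [pv_insertBy_nil]
  | cons y ys ih =>
    rw [List.pairwise_cons] at h
    by_cases hlt : key x < key y
    · rw [pv_insertBy_cons_pos _ _ _ _ (by simp [hlt])]
      refine List.Pairwise.cons ?_ (List.Pairwise.cons h.1 h.2)
      intro b hb
      rcases List.mem_cons.mp hb with rfl | hb
      · exact le_of_lt hlt
      · exact le_trans (le_of_lt hlt) (h.1 b hb)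
    · rw [pv_insertBy_cons_neg _ _ _ _ (by simp [hlt])]
      refine List.Pairwise.cons ?_ (ih h.2)
      intro b hb
      rcases (PySem.List.mem_insertBy _ _ _ _).mp hb with rfl | hb
      · exact le_of_not_gt hlt
      · exact h.1 b hb

theorem pv_filter_insertBy_ne {α : Type} (key : α → Int) (v : Int) (x : α) (acc : List α)
    (hx : ¬ key x = v) :
    (PySem.List.insertBy (fun a b => decide (key a < key b)) x acc).filter
        (fun y => key y == v)
      = acc.filter (fun y => key y == v) := by
  induction acc with
  | nil => simp [pv_insertBy_nil, hx]
  | cons y ys ih =>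
    by_cases hlt : key x < key y
    · rw [pv_insertBy_cons_pos _ _ _ _ (by simp [hlt])]
      simp [List.filter_cons, hx]
    · rw [pv_insertBy_cons_neg _ _ _ _ (by simp [hlt])]
      simp [List.filter_cons, ih]

theorem pv_filter_insertBy_eq {α : Type} (key : α → Int) (v : Int) (x : α) (acc : List α)
    (hx : key x = v) (h : acc.Pairwise (fun a b => key a ≤ key b)) :
    (PySem.List.insertBy (fun a b => decide (key a < key b)) x acc).filter
        (fun y => key y == v)
      = acc.filter (fun y => key y == v) ++ [x] := by
  induction acc with
  | nil => simp [pv_insertBy_nil, hx]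
  | cons y ys ih =>
    rw [List.pairwise_cons] at h
    by_cases hlt : key x < key y
    · have h1 : (y :: ys).filter (fun z => key z == v) = [] := by
        rw [List.filter_eq_nil_iff]
        intro z hz
        rcases List.mem_cons.mp hz with rfl | hz
        · simp; omega
        · have := h.1 z hz; simp; omega
      rw [pv_insertBy_cons_pos _ _ _ _ (by simp [hlt])]
      rw [List.filter_cons_of_pos (by simp [hx]), h1]
      simp
    · rw [pv_insertBy_cons_neg _ _ _ _ (by simp [hlt])]
      rw [List.filter_cons, List.filter_cons, ih h.2]
      by_cases hy : key y = v <;> simp [hy]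

theorem pv_sorted_filter {α : Type} (key : α → Int) (v : Int) (xs : List α) :
    (PySem.List.sorted xs key false).filter (fun y => key y == v)
      = xs.filter (fun y => key y == v) := by
  rw [PySem.List.sorted_eq_foldl_insertBy]
  suffices h : ∀ (acc : List α), acc.Pairwise (fun a b => key a ≤ key b) →
      (xs.foldl (fun acc x => PySem.List.insertBy (fun a b => decide (key a < key b)) x acc) acc).filter (fun y => key y == v)
        = acc.filter (fun y => key y == v) ++ xs.filter (fun y => key y == v) by
    simpa using h [] (by simp)
  induction xs with
  | nil => intro acc hacc; simp
  | cons x xs ih =>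
    intro acc hacc
    simp only [List.foldl_cons]
    rw [ih _ (pv_insertBy_pairwise key x acc hacc), List.filter_cons]
    by_cases hx : key x = v
    · rw [pv_filter_insertBy_eq key v x acc hx hacc]; simp [hx]
    · rw [pv_filter_insertBy_ne key v x acc hx]; simp [hx]

theorem pv_pairwise_unique {α : Type} (key : α → Int) : ∀ (ys zs : List α),
    ys.Pairwise (fun a b => key a ≤ key b) → zs.Pairwise (fun a b => key a ≤ key b) →
    (∀ v, ys.filter (fun y => key y == v) = zs.filter (fun y => key y == v)) →
    ys = zs := by
  intro ys
  induction ys with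
  | nil =>
    intro zs _ _ hf
    cases zs with
    | nil => rfl
    | cons b zs' =>
      have := hf (key b)
      simp [List.filter_cons] at this
  | cons a ys' ih =>
    intro zs hy hz hf
    cases zs with
    | nil =>
      have := hf (key a)
      simp [List.filter_cons] at this
    | cons b zs' =>
      rw [List.pairwise_cons] at hy hz
      have hab : key a = key b := by
        have h1 := hf (key a)
        have h2 := hf (key b)
        have hmem1 : ∃ z ∈ b :: zs', key z = key a := by
          by_contra hcon
          push_neg at hcon
          have hnil : (b :: zs').filter (fun y => key y == key a) = [] := by
            rw [List.filter_eq_nil_iff]; intro z hz'; simpa using hcon z hz'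
          rw [hnil] at h1
          simp at h1
        have hmem2 : ∃ z ∈ a :: ys', key z = key b := by
          by_contra hcon
          push_neg at hcon
          have hnil : (a :: ys').filter (fun y => key y == key b) = [] := by
            rw [List.filter_eq_nil_iff]; intro z hz'; simpa using hcon z hz'
          rw [hnil] at h2
          simp at h2
        obtain ⟨z1, hz1, hkz1⟩ := hmem1
        obtain ⟨z2, hz2, hkz2⟩ := hmem2
        have hba : key b ≤ key a := by
          rcases List.mem_cons.mp hz1 with rfl | hz1
          · omega
          · have := hz.1 z1 hz1; omega
        have hab' : key a ≤ key b := by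
          rcases List.mem_cons.mp hz2 with rfl | hz2
          · omega
          · have := hy.1 z2 hz2; omega
        omega
      have h1 := hf (key a)
      rw [List.filter_cons_of_pos (by simp), List.filter_cons_of_pos (by simp [hab])] at h1
      have hhd : a = b := by simpa using congrArg (·.head?) h1
      have htl : ys' = zs' := by
        refine ih zs' hy.2 hz.2 ?_
        intro v
        have h2 := hf v
        by_cases hv : key a = v
        · rw [List.filter_cons_of_pos (by simp [hv]),
              List.filter_cons_of_pos (by simp [← hab, hv])] at h2
          simpa [hhd] using h2
        · rwa [List.filter_cons_of_neg (by simp [hv]),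
              List.filter_cons_of_neg (by simp [← hab, hv])] at h2
      rw [hhd, htl]

theorem pv_sorted_eq_of_filters {α : Type} (key : α → Int) (xs zs : List α)
    (hz : zs.Pairwise (fun a b => key a ≤ key b))
    (hf : ∀ v, xs.filter (fun y => key y == v) = zs.filter (fun y => key y == v)) :
    PySem.List.sorted xs key false = zs := by
  refine pv_pairwise_unique key _ _ (PySem.List.sorted_pairwise xs key) hz ?_
  intro v
  rw [pv_sorted_filter key v xs]
  exact hf v

-- ===================== stage 7: stable sort = scan order =====================

theorem pv_flatMap_congr {α β : Type} (l : List α) (f g : α → List β)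
    (h : ∀ a ∈ l, f a = g a) : l.flatMap f = l.flatMap g := by
  rw [List.flatMap_def, List.flatMap_def, List.map_congr_left h]

theorem pv_mem_row (text : String) (seps : List String) (i : Int)
    (x : String × Int)
    (hx : x ∈ seps.flatMap (fun k => if i ∈ pvStarts text k then [(k, i)] else [])) :
    x.2 = i := by
  rw [List.mem_flatMap] at hx
  obtain ⟨k, _, hk2⟩ := hx
  by_cases hmem : i ∈ pvStarts text k
  · rw [if_pos hmem] at hk2
    simp at hk2
    simp [hk2]
  · rw [if_neg hmem] at hk2
    simp at hk2

theorem pv_sorted_master (text : String) (sep_list : List String) :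
    PySem.List.sorted
        ((pvSeps sep_list).flatMap
          (fun k => (find_all_char text k false false).map (fun s => (k, s))))
        (fun x => x.2.1) false
      = ((PySem.List.pyRange 0 ((text.toList.length : Nat) : Int) 1).flatMap
            (fun i => (pvSeps sep_list).flatMap
              (fun k => if i ∈ pvStarts text k then [(k, i)] else []))).map
          (fun m => (m.1, (m.2, m.2 + PySem.Str.len m.1))) := by
  refine pv_sorted_eq_of_filters (fun x : String × Int × Int => x.2.1) _ _ ?_ ?_
  · -- pairwise on the scan-order list
    rw [List.pairwise_map]
    rw [List.flatMap_def, List.pairwise_flatten]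
    constructor
    · intro l hl
      rw [List.mem_map] at hl
      obtain ⟨i, _, rfl⟩ := hl
      refine List.pairwise_of_forall_mem_list ?_
      intro a ha b hb
      rw [pv_mem_row text _ i a ha, pv_mem_row text _ i b hb]
    · rw [List.pairwise_map]
      refine (PySem.List.pairwise_lt_pyRange_one 0 _).imp ?_
      intro i j hij x hx y hy
      have hxi := pv_mem_row text _ i x hx
      have hyj := pv_mem_row text _ j y hy
      show x.2 ≤ y.2
      omega
  · -- filters agree at every key value
    intro v
    -- left side
    rw [List.filter_flatMap]
    have hleft : ∀ k ∈ pvSeps sep_list,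
        ((find_all_char text k false false).map (fun s => (k, s))).filter
            (fun y => y.2.1 == v)
          = if v ∈ pvStarts text k then [(k, (v, v + (k.toList.length : Int)))] else [] := by
      intro k hk
      have hkn := pvSeps_ne sep_list k hk
      have hkl : 1 ≤ k.toList.length := List.length_pos_of_ne_nil hkn
      obtain ⟨hshape, hpw, _⟩ := pvG_spec text k hkn
      rw [List.filter_map]
      have : ((find_all_char text k false false).filter
            ((fun (y : String × Int × Int) => y.2.1 == v) ∘ fun s => (k, s)))
          = (find_all_char text k false false).filter (fun x => x.1 == v) := rfl
      rw [this]
      rw [pv_pair_filter (k.toList.length : Int) (by exact_mod_cast hkl) _ hpw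
        (by
          intro x hx
          obtain ⟨s, rfl, _, _⟩ := hshape x hx
          rfl) v]
      rw [show (find_all_char text k false false).map Prod.fst = pvStarts text k from rfl]
      by_cases hmem : v ∈ pvStarts text k
      · rw [if_pos hmem, if_pos hmem]
        rfl
      · rw [if_neg hmem, if_neg hmem]
        rfl
    rw [pv_flatMap_congr _ _ _ hleft]
    -- right side
    rw [List.filter_map]
    have hcomp : ((fun (y : String × Int × Int) => y.2.1 == v)
        ∘ fun m : String × Int => (m.1, (m.2, m.2 + PySem.Str.len m.1)))
        = fun m : String × Int => m.2 == v := rfl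
    rw [hcomp, List.filter_flatMap]
    have hrow : ∀ i ∈ PySem.List.pyRange 0 ((text.toList.length : Nat) : Int) 1,
        ((pvSeps sep_list).flatMap
            (fun k => if i ∈ pvStarts text k then [(k, i)] else [])).filter
          (fun m => m.2 == v)
        = if i = v then (pvSeps sep_list).flatMap
            (fun k => if i ∈ pvStarts text k then [(k, i)] else []) else [] := by
      intro i _
      by_cases hiv : i = v
      · rw [if_pos hiv, List.filter_eq_self.mpr ?_]
        intro a ha
        rw [pv_mem_row text _ i a ha]
        simp [hiv]
      · rw [if_neg hiv, List.filter_eq_nil_iff.mpr ?_]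
        intro a ha
        rw [pv_mem_row text _ i a ha]
        simp [hiv]
    rw [pv_flatMap_congr _ _ _ hrow]
    rw [pv_flatMap_if_nodup _ v _ (PySem.List.nodup_pyRange_one _ _)]
    by_cases hv : v ∈ PySem.List.pyRange 0 ((text.toList.length : Nat) : Int) 1
    · rw [if_pos hv]
      rw [List.map_flatMap]
      refine pv_flatMap_congr _ _ _ ?_
      intro k hk
      by_cases hmem : v ∈ pvStarts text k
      · rw [if_pos hmem, if_pos hmem]
        simp
      · rw [if_neg hmem, if_neg hmem]
        rfl
    · rw [if_neg hv]
      rw [List.map_nil, List.flatMap_eq_nil_iff]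
      intro k hk
      rw [if_neg]
      intro hmem
      have hkn := pvSeps_ne sep_list k hk
      have hkl : 1 ≤ k.toList.length := List.length_pos_of_ne_nil hkn
      obtain ⟨h1, h2, _⟩ := (pvStarts_props text k hkn).2.1 v hmem
      exact hv (PySem.List.mem_pyRange_one.mpr (by constructor <;> omega))

-- ===================== stage 8: the main equivalence =====================

theorem pv_gend_zero (text k : String) (hk : k.toList ≠ []) : pvGend text k 0 = 0 := by
  rw [pvGend, List.filter_eq_nil_iff.mpr ?_]
  · rfl
  · intro s hs
    have := ((pvStarts_props text k hk).2.1 s hs).1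
    simp
    omega

theorem pv_main (text : String) (sep_list : List String) :
    split_text_by_sep text sep_list = split_text_by_sep_alt text sep_list := by
  simp only [split_text_by_sep, split_text_by_sep_alt]
  rw [pv_idx_list_eq text sep_list]
  rw [show ((PySem.List.dedup sep_list).filter (fun s => !(s == ""))) = pvSeps sep_list from rfl]
  rw [pv_sorted_master text sep_list]
  rw [pv_len_eq text]
  have hscan :
      ((PySem.List.pyRange ((0 : Nat) : Int) ((text.toList.length : Nat) : Int) 1).foldl
          (pvScanStep text (pvSeps sep_list))
          ([], (pvSeps sep_list).foldl (fun d s => d.insert s 0) PySem.Dict.empty)).1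
        = (PySem.List.pyRange ((0 : Nat) : Int) ((text.toList.length : Nat) : Int) 1).flatMap
            (fun i => (pvSeps sep_list).flatMap
              (fun k => if i ∈ pvStarts text k then [(k, i)] else [])) := by
    rw [pv_outer text (pvSeps sep_list) (pvSeps_nodup sep_list) (pvSeps_ne sep_list)
      (text.toList.length) 0 [] _ (by omega) ?_]
    · simp
    · intro k hk
      rw [pv_getD_foldl_insert_fn (fun _ => (0 : Int)) _ _ k 0]
      rw [show ((0 : Nat) : Int) = (0 : Int) from rfl, pv_gend_zero text k (pvSeps_ne sep_list k hk)]
      split <;> rfl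
  rw [show ((0 : Nat) : Int) = (0 : Int) from rfl] at hscan
  rw [hscan]
  rw [List.foldl_map]

-- ===== VERDICT (by name: the statement is the Claim_ definition above) =====
theorem split_text_by_sep_spec : Claim_equal_split_text_by_sep :=
  fun text sep_list _ => pv_main text sep_list
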